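-- pv_equiv track=rewrite | github.com/DataNewbie1997/UraiRajut | UraiRajut.py | rajut
-- ===== SOURCE A (Python) =====
-- def rajut(text):
--     akhir1 = ''
--     index = 1
--     counter = 2
--     while index <= (len(text)):
--         akhir1 = akhir1 + text[index-1]
--         index = index + counter
--         counter = counter + 1
--     return akhir1
-- ===== SOURCE B (Python) =====
-- def rajut(text):
--     n = len(text)
--     return ''.join(text[k * (k + 1) // 2 - 1] for k in range(1, n + 1) if k * (k + 1) // 2 <= n)
-- ===== Notes on version B (the rewrite author's own statement) =====
-- stated objective: simpler
-- what changed: Replaces the while loop carrying running accumulators index/counter with a direct closed-form selection: one comprehension picking text[k*(k+1)//2 - 1] for every k whose triangular number fits in len(text).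
import Mathlib
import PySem

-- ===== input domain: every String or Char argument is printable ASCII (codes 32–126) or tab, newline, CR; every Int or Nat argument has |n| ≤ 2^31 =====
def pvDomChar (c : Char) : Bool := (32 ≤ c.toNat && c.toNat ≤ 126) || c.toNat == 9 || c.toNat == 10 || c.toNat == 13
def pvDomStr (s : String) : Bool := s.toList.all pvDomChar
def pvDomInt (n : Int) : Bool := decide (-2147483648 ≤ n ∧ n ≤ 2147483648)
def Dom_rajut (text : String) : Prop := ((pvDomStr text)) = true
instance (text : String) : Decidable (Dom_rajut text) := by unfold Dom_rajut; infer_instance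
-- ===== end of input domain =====

-- B replaces A's while loop with two running accumulators (index, counter) by a direct
-- positional formula: it selects text[k*(k+1)//2 - 1] for every k with k*(k+1)//2 <= len(text).
-- Objective: simpler. Both programs are total; return values agree on every input.

-- ===== PORT A =====
-- A's while loop; the Python counter is carried as c with counter = c + 1 (c ≥ 1 always),
-- which makes the strictly increasing index a termination measure. text[index-1] is ported
-- with PySem.List.pyGet? (always in range here, so the .getD ' ' default is never used).
def rajutLoopA (cs : List Char) (akhir : List Char) (index : Int) (c : Nat) : List Char :=
  if index ≤ (cs.length : Int) then
    rajutLoopA cs (akhir ++ [(PySem.List.pyGet? cs (index - 1)).getD ' '])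
      (index + ((c : Int) + 1)) (c + 1)
  else akhir
termination_by (cs.length + 1 - index).toNat
decreasing_by omega

def rajut (text : String) : String :=
  String.mk (rajutLoopA text.toList [] 1 1)

-- ===== PORT B =====
-- Source B: ''.join(text[k*(k+1)//2 - 1] for k in range(1, n+1) if k*(k+1)//2 <= n).
-- k ≥ 1, so k*(k+1)//2 has a positive dividend and Lean's Int `/` equals Python's `//` here.
def rajut_alt (text : String) : String :=
  String.mk ((((PySem.List.pyRange 1 ((text.toList.length : Int) + 1) 1).filter
      (fun k => k * (k + 1) / 2 ≤ (text.toList.length : Int))).map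
      (fun k => (PySem.List.pyGet? text.toList (k * (k + 1) / 2 - 1)).getD ' ')))

-- ===== PRECONDITION & SPEC =====
def Spec_rajut (text : String) (out : String) : Prop := out = rajut_alt text
instance (text : String) (out : String) : Decidable (Spec_rajut text out) := by unfold Spec_rajut; infer_instance

-- ===== CLAIM (what is proved, stated in full; the proofs are below) =====
def Claim_equal_rajut : Prop := ∀ (text : String), Dom_rajut text → Spec_rajut text (rajut text)

-- ===== LEMMAS AND PROOFS =====

-- the Int triangular number j*(j+1)/2 of a Nat j, doubled: 2 * (j*(j+1)/2) = j*(j+1)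
theorem pv_two_mul_tri (j : Int) (hj : 0 ≤ j) : 2 * (j * (j + 1) / 2) = j * (j + 1) := by
  rcases Int.even_mul_succ_self j with ⟨m, hm⟩
  omega

-- monotonicity of the triangular formula on nonneg Ints
theorem pv_tri_mono {j k : Int} (h0 : 0 ≤ j) (h : j ≤ k) :
    j * (j + 1) / 2 ≤ k * (k + 1) / 2 := by
  have h1 : j * (j + 1) ≤ k * (k + 1) := by nlinarith
  omega

-- loop invariant: at state (index = T j, counter = j + 1), the loop appends exactly
-- B's selection over the remaining range [j, n+1)
theorem pv_loop_eq (cs : List Char) : ∀ (m j : Nat), cs.length + 1 - j ≤ m → 1 ≤ j →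
    ∀ (akhir : List Char),
    rajutLoopA cs akhir ((j : Int) * ((j : Int) + 1) / 2) j =
      akhir ++ (((PySem.List.pyRange (j : Int) ((cs.length : Int) + 1) 1).filter
          (fun k => k * (k + 1) / 2 ≤ (cs.length : Int))).map
          (fun k => (PySem.List.pyGet? cs (k * (k + 1) / 2 - 1)).getD ' ')) := by
  intro m
  induction m with
  | zero =>
    intro j hm hj akhir
    -- j > cs.length, so T j ≥ j > n : loop exits and the range filters to nothing
    have hjn : ((cs.length : Int)) < j := by omega
    have hT : ¬ ((j : Int) * ((j : Int) + 1) / 2 ≤ (cs.length : Int)) := by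
      have h2 : (j : Int) ≤ (j : Int) * ((j : Int) + 1) / 2 := by
        have := pv_two_mul_tri (j : Int) (by exact_mod_cast Nat.zero_le j)
        nlinarith [this]
      omega
    have hfilter : ((PySem.List.pyRange (j : Int) ((cs.length : Int) + 1) 1).filter
        (fun k => k * (k + 1) / 2 ≤ (cs.length : Int))) = [] := by
      rw [List.filter_eq_nil_iff]
      intro k hk
      rw [PySem.List.mem_pyRange_one] at hk
      have : ¬ (k * (k + 1) / 2 ≤ (cs.length : Int)) := by
        have := pv_tri_mono (j := (j : Int)) (k := k) (by exact_mod_cast Nat.zero_le j) hk.1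
        omega
      simpa using this
    rw [rajutLoopA, if_neg hT, hfilter]
    simp
  | succ m ih =>
    intro j hm hj akhir
    rw [rajutLoopA]
    by_cases hT : (j : Int) * ((j : Int) + 1) / 2 ≤ (cs.length : Int)
    · -- loop body runs: picks k = j, then continues at j+1 with index = T (j+1)
      have hjpos : (1 : Int) ≤ (j : Int) := by exact_mod_cast hj
      have hjT : (j : Int) ≤ (j : Int) * ((j : Int) + 1) / 2 := by
        have := pv_two_mul_tri (j : Int) (by omega)
        nlinarith [this]
      have hjn : (j : Int) ≤ (cs.length : Int) := le_trans hjT hT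
      have hsucc : (j : Int) * ((j : Int) + 1) / 2 + ((j : Int) + 1) =
          ((j : Int) + 1) * (((j : Int) + 1) + 1) / 2 := by
        have h1 := pv_two_mul_tri (j : Int) (by omega)
        have h2 := pv_two_mul_tri ((j : Int) + 1) (by omega)
        nlinarith [h1, h2]
      rw [if_pos hT]
      have hcast : ((j + 1 : Nat) : Int) = (j : Int) + 1 := by push_cast; ring
      have hstep := ih (j + 1) (by omega) (by omega)
        (akhir ++ [(PySem.List.pyGet? cs ((j : Int) * ((j : Int) + 1) / 2 - 1)).getD ' '])
      rw [hcast] at hstep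
      rw [hsucc, hstep]
      have hcons : PySem.List.pyRange (j : Int) ((cs.length : Int) + 1) 1 =
          (j : Int) :: PySem.List.pyRange ((j : Int) + 1) ((cs.length : Int) + 1) 1 :=
        PySem.List.pyRange_one_cons (by omega)
      rw [hcons, List.filter_cons, if_pos (by simpa using hT)]
      simp
    · -- loop exits; every k ≥ j in the range fails the filter
      rw [if_neg hT]
      have hfilter : ((PySem.List.pyRange (j : Int) ((cs.length : Int) + 1) 1).filter
          (fun k => k * (k + 1) / 2 ≤ (cs.length : Int))) = [] := by
        rw [List.filter_eq_nil_iff]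
        intro k hk
        rw [PySem.List.mem_pyRange_one] at hk
        have : ¬ (k * (k + 1) / 2 ≤ (cs.length : Int)) := by
          have := pv_tri_mono (j := (j : Int)) (k := k) (by exact_mod_cast Nat.zero_le j) hk.1
          omega
        simpa using this
      rw [hfilter]
      simp

-- ===== VERDICT (by name: the statement is the Claim_ definition above) =====
theorem rajut_spec : Claim_equal_rajut := by
  intro text _
  unfold Spec_rajut rajut rajut_alt
  have h := pv_loop_eq text.toList (text.toList.length) 1 (by omega) le_rfl []
  norm_num at h
  simp only [String.length_toList] at h ⊢
  rw [h]
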